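-- pv_equiv track=rewrite | github.com/TheSuspect17/Chislyki_nashe_vse | matrix.py | alg_dop
-- ===== SOURCE A (Python) =====
-- def det2(matrix):
--     return matrix[0][0] * matrix[1][1] - matrix[1][0] * matrix[0][1]
--
-- def alg_dop(matrix, somme=None, prod=1):
--     if (somme == None):
--         somme = []
--     if (len(matrix) == 1):
--         somme.append(matrix[0][0])
--     elif (len(matrix) == 2):
--         somme.append(det2(matrix) * prod)
--     else:
--         for index, elmt in enumerate(matrix[0]):
--             transposee = [list(a) for a in zip(*matrix[1:])]
--             del transposee[index]
--             mineur = [list(a) for a in zip(*transposee)]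
--             somme = alg_dop(mineur, somme, prod * matrix[0][index] * (-1) ** (index + 2))
--     return somme
-- ===== SOURCE B (Python) =====
-- def alg_dop(matrix, somme=None, prod=1):
--     if somme is None:
--         somme = []
--     if len(matrix) == 1:
--         somme.append(matrix[0][0])
--         return somme
--
--     def expand(r, cols, p):
--         if r + 2 == len(matrix):
--             somme.append((matrix[r][cols[0]] * matrix[r + 1][cols[1]]
--                           - matrix[r + 1][cols[0]] * matrix[r][cols[1]]) * p)
--             return
--         for i in range(len(cols)):
--             c = cols[i]
--             expand(r + 1, cols[:i] + cols[i + 1:], p * matrix[r][c] * (-1) ** i)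
--
--     expand(0, list(range(len(matrix[0]))), prod)
--     return somme
-- ===== Notes on version B (the rewrite author's own statement) =====
-- stated objective: alternative
-- what changed: Instead of A's recursive construction of each physical minor (transpose via zip, delete a column, transpose back, recurse on the new submatrix), B recurses on a list of remaining column indices and a row offset, reading entries directly from the original matrix and never building submatrices.
-- outside the precondition, e.g. on alg_dop([[1, 2], [3, 4, 5], [6, 7, 8]], None, 1): A returns [-3, 12], B raises IndexError; on alg_dop([[1, 2, 3], [4, 5, 6], [7, 8, 9, 10]], None, 1): A returns [-3, 12, -9], B returns [-3, 12, -9]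
import Mathlib
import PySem

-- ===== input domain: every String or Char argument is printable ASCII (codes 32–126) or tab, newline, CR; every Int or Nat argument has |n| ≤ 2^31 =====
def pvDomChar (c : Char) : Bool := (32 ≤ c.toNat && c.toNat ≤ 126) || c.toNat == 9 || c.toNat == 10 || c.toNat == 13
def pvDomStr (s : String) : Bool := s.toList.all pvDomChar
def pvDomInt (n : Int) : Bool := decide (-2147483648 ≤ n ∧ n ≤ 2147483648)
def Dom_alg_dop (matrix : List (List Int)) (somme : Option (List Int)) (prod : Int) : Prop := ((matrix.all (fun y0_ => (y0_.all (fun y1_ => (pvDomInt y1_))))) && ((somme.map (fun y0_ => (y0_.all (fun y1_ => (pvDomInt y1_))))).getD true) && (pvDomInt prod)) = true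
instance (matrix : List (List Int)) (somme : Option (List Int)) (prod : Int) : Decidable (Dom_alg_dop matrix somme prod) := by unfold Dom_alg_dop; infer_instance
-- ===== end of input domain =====

-- B replaces A's recursive construction of physical minors (double zip-transpose + del per
-- column) by a recursion that only tracks the list of remaining column indices and reads the
-- original matrix; objective: alternative decomposition.  Both Pythons append into the caller's
-- `somme` list and return it; the equivalence proved here is about the returned value.

-- ===== PORT A =====
-- matrix[i][j] for nonnegative in-range indices (all accesses are in range inside Pre_)
def pyCell (M : List (List Int)) (i j : Nat) : Int := (M.getD i []).getD j 0

-- zip(*rows) for integer rows: truncates to the shortest row; zip() of no rows is empty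
def pyZipStar : List (List Int) → List (List Int)
  | [] => []
  | r0 :: rest =>
      (List.range ((rest.map List.length).foldl min r0.length)).map
        (fun i => (r0 :: rest).map (fun row => row.getD i 0))

def det2 (M : List (List Int)) : Int :=
  pyCell M 0 0 * pyCell M 1 1 - pyCell M 1 0 * pyCell M 0 1

-- fuel (first argument) only makes the nested recursion structural; alg_dop passes
-- matrix.length, which is enough depth on every input Pre_ admits
def alg_dop_go : Nat → List (List Int) → List Int → Int → List Int
  | 0, _, somme, _ => somme
  | f + 1, M, somme, p =>
    if M.length = 1 then somme ++ [pyCell M 0 0]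
    else if M.length = 2 then somme ++ [det2 M * p]
    else
      (List.range (M.headD []).length).foldl
        (fun s index =>
          let transposee := pyZipStar (M.drop 1)
          let transposee' := transposee.eraseIdx index
          let mineur := pyZipStar transposee'
          alg_dop_go f mineur s (p * pyCell M 0 index * (-1) ^ (index + 2))) somme

def alg_dop (matrix : List (List Int)) (somme : Option (List Int)) (prod : Int) : List Int :=
  alg_dop_go matrix.length matrix (somme.getD []) prod

-- ===== PORT B =====
-- expand(r, cols, p) of Source B; fuel (third argument) only makes the recursion structural,
-- alg_dop_alt passes matrix.length which is enough depth
def alg_dop_expand (M : List (List Int)) (n : Nat) : Nat → Nat → List Nat → Int → List Int → List Int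
  | 0, _, _, _, acc => acc
  | d + 1, r, cols, p, acc =>
    if r + 2 = n then
      acc ++ [(pyCell M r (cols.getD 0 0) * pyCell M (r + 1) (cols.getD 1 0)
             - pyCell M (r + 1) (cols.getD 0 0) * pyCell M r (cols.getD 1 0)) * p]
    else
      (List.range cols.length).foldl
        (fun a i =>
          alg_dop_expand M n d (r + 1) (cols.take i ++ cols.drop (i + 1))
            (p * pyCell M r (cols.getD i 0) * (-1) ^ i) a) acc

def alg_dop_alt (matrix : List (List Int)) (somme : Option (List Int)) (prod : Int) : List Int :=
  if matrix.length = 1 then somme.getD [] ++ [pyCell matrix 0 0]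
  else
    alg_dop_expand matrix matrix.length matrix.length 0
      (List.range (matrix.headD []).length) prod (somme.getD [])

-- ===== PRECONDITION & SPEC =====
-- Pre_ keeps exactly the natural determinant inputs: 1 or 2 rows with enough columns, or ≥3 rows
-- that are empty or form a rectangle at least as wide as it is tall.  It excludes inputs where A
-- raises IndexError (too few columns somewhere along the expansion), and non-rectangular
-- matrices of ≥3 rows with a nonempty first row, on which A's zip-transpose silently truncates
-- every minor to the shortest row — an artefact of the construction; B raises or expands the
-- untruncated columns there.
def Pre_alg_dop (matrix : List (List Int)) (somme : Option (List Int)) (prod : Int) : Prop :=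
  (matrix.length = 1 ∧ 1 ≤ (matrix.headD []).length) ∨
  (matrix.length = 2 ∧ 2 ≤ (matrix.headD []).length ∧ 2 ≤ (matrix.getD 1 []).length) ∨
  (3 ≤ matrix.length ∧
    ((matrix.headD []).length = 0 ∨
      ((∀ row ∈ matrix, row.length = (matrix.headD []).length) ∧
        matrix.length ≤ (matrix.headD []).length)))
instance (matrix : List (List Int)) (somme : Option (List Int)) (prod : Int) : Decidable (Pre_alg_dop matrix somme prod) := by unfold Pre_alg_dop; infer_instance

def pvWitness_alg_dop : List (List Int) × Option (List Int) × Int :=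
  ([[2, 0, 0], [0, 1, 0], [0, 0, 1]], none, 1)

def Spec_alg_dop (matrix : List (List Int)) (somme : Option (List Int)) (prod : Int) (out : List Int) : Prop := out = alg_dop_alt matrix somme prod
instance (matrix : List (List Int)) (somme : Option (List Int)) (prod : Int) (out : List Int) : Decidable (Spec_alg_dop matrix somme prod out) := by unfold Spec_alg_dop; infer_instance

-- ===== CLAIM (what is proved, stated in full; the proofs are below) =====
def Claim_equal_alg_dop : Prop := ∀ (matrix : List (List Int)) (somme : Option (List Int)) (prod : Int), Dom_alg_dop matrix somme prod → Pre_alg_dop matrix somme prod → Spec_alg_dop matrix somme prod (alg_dop matrix somme prod)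

-- ===== LEMMAS AND PROOFS =====

-- the submatrix of M that B's state (r, cols) denotes: rows r.. restricted to columns cols
def restrictM (M : List (List Int)) (r : Nat) (cols : List Nat) : List (List Int) :=
  (M.drop r).map (fun row => cols.map (fun c => row.getD c 0))

theorem headD_eq_getD_zero {α : Type} (l : List α) (d : α) : l.headD d = l.getD 0 d := by
  cases l <;> rfl

theorem map_getD_range {α : Type} (xs : List α) (d : α) :
    (List.range xs.length).map (fun i => xs.getD i d) = xs := by
  apply List.ext_getElem (by simp)
  intro i h1 h2
  simp [List.getD, List.getElem?_eq_getElem h2]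

theorem getD_map_lt {α β : Type} (l : List α) (f : α → β) (j : Nat) (d : β) (d' : α)
    (h : j < l.length) : (l.map f).getD j d = f (l.getD j d') := by
  simp [List.getD, List.getElem?_map, List.getElem?_eq_getElem h]

theorem eraseIdx_as_range {α : Type} (xs : List α) (d : α) (i : Nat) :
    xs.eraseIdx i = ((List.range xs.length).eraseIdx i).map (fun c => xs.getD c d) := by
  induction xs generalizing i with
  | nil => simp
  | cons x t ih =>
    cases i with
    | zero =>
      simp only [List.eraseIdx_zero, List.tail_cons, List.length_cons, List.range_succ_eq_map,
        List.map_map]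
      conv_lhs => rw [← map_getD_range t d]
      refine List.map_congr_left fun c _ => ?_
      simp
    | succ i =>
      rw [List.eraseIdx_cons_succ, List.length_cons, List.range_succ_eq_map,
        List.eraseIdx_cons_succ, List.map_cons, ← List.eraseIdx_map, List.map_map]
      congr 1
      rw [ih i, ← List.eraseIdx_map]
      congr 1

theorem foldl_min_const (l : List Nat) (w : Nat) (h : ∀ x ∈ l, x = w) :
    l.foldl min w = w := by
  induction l with
  | nil => rfl
  | cons x t ih =>
    rw [List.foldl_cons, h x (by simp), min_self]
    exact ih fun y hy => h y (by simp [hy])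

theorem pyZipStar_rect (rows : List (List Int)) (w : Nat) (hne : rows ≠ [])
    (hw : ∀ x ∈ rows, x.length = w) :
    pyZipStar rows = (List.range w).map (fun i => rows.map (fun row => row.getD i 0)) := by
  cases rows with
  | nil => exact absurd rfl hne
  | cons r0 rest =>
    rw [pyZipStar]
    rw [show (rest.map List.length).foldl min r0.length = w by
      rw [hw r0 (by simp)]
      refine foldl_min_const _ _ ?_
      intro x hx
      simp only [List.mem_map] at hx
      obtain ⟨y, hy, rfl⟩ := hx
      exact hw y (by simp [hy])]

-- A's minor construction, on a rectangular block: double zip-transpose with the column deleted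
-- in between = delete column i from every row below the first
theorem minor_eq_eraseIdx (rows : List (List Int)) (w : Nat) (i : Nat) (hne : rows ≠ [])
    (hw : ∀ x ∈ rows, x.length = w) (hi : i < w) (h2 : 2 ≤ w) :
    pyZipStar ((pyZipStar rows).eraseIdx i) = rows.map (fun row => row.eraseIdx i) := by
  rw [pyZipStar_rect rows w hne hw, List.eraseIdx_map]
  set idxs := (List.range w).eraseIdx i with hidxs
  have hlen : idxs.length = w - 1 := by
    simp [hidxs, List.length_eraseIdx, hi]
  have hidne : idxs.map (fun c => rows.map (fun row => row.getD c 0)) ≠ [] := by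
    intro hcon
    have := congrArg List.length hcon
    simp [hlen] at this
    omega
  rw [pyZipStar_rect _ rows.length hidne (by
    intro x hx
    simp only [List.mem_map] at hx
    obtain ⟨c, _, rfl⟩ := hx
    simp)]
  conv_rhs => rw [← map_getD_range rows []]
  simp only [List.map_map]
  refine List.map_congr_left ?_
  intro j hj
  simp only [List.mem_range] at hj
  have hwj : (rows.getD j []).length = w := by
    rw [List.getD, List.getElem?_eq_getElem hj]
    exact hw _ (by simp)
  show List.map ((fun row => row.getD j 0) ∘ fun c => rows.map (fun row => row.getD c 0)) idxs
      = (rows.getD j []).eraseIdx i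
  rw [eraseIdx_as_range (rows.getD j []) 0 i, hwj, ← hidxs]
  refine List.map_congr_left ?_
  intro c _
  show (rows.map (fun row => row.getD c 0)).getD j 0 = (rows.getD j []).getD c 0
  rw [getD_map_lt rows _ j 0 [] hj]

theorem restrictM_length (M : List (List Int)) (r : Nat) (cols : List Nat) :
    (restrictM M r cols).length = M.length - r := by
  simp [restrictM]

theorem restrictM_getD (M : List (List Int)) (r : Nat) (cols : List Nat) (a : Nat)
    (ha : a < M.length - r) :
    (restrictM M r cols).getD a [] = cols.map (fun c => (M.getD (r + a) []).getD c 0) := by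
  have h1 : a < (M.drop r).length := by simp; omega
  rw [restrictM, getD_map_lt _ _ _ _ [] h1]
  congr 1
  simp [List.getD, List.getElem?_drop]

theorem pyCell_restrictM (M : List (List Int)) (r : Nat) (cols : List Nat) (a b : Nat)
    (ha : a < M.length - r) (hb : b < cols.length) :
    pyCell (restrictM M r cols) a b = pyCell M (r + a) (cols.getD b 0) := by
  rw [pyCell, restrictM_getD M r cols a ha, getD_map_lt _ _ _ _ 0 hb, pyCell]

-- main invariant: on the block (r, cols), A's recursion on the physical submatrix equals
-- B's index-tracking recursion on the original matrix
theorem main_equiv (M : List (List Int)) :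
    ∀ k, 2 ≤ k → ∀ r cols (s : List Int) (p : Int) f d,
      r + k = M.length → k ≤ f → k ≤ d → k ≤ cols.length →
      alg_dop_go f (restrictM M r cols) s p = alg_dop_expand M M.length d r cols p s := by
  intro k hk
  induction k, hk using Nat.le_induction with
  | base =>
    intro r cols s p f d hr hf hd hc
    obtain ⟨f', rfl⟩ : ∃ f', f = f' + 1 := ⟨f - 1, by omega⟩
    obtain ⟨d', rfl⟩ : ∃ d', d = d' + 1 := ⟨d - 1, by omega⟩
    have hlen : (restrictM M r cols).length = 2 := by rw [restrictM_length]; omega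
    rw [alg_dop_go, hlen, if_neg (by omega), if_pos rfl, alg_dop_expand, if_pos (by omega)]
    rw [det2, pyCell_restrictM M r cols 0 0 (by omega) (by omega),
        pyCell_restrictM M r cols 1 1 (by omega) (by omega),
        pyCell_restrictM M r cols 1 0 (by omega) (by omega),
        pyCell_restrictM M r cols 0 1 (by omega) (by omega), Nat.add_zero]
  | succ k hk2 ih =>
    intro r cols s p f d hr hf hd hc
    obtain ⟨f', rfl⟩ : ∃ f', f = f' + 1 := ⟨f - 1, by omega⟩
    obtain ⟨d', rfl⟩ : ∃ d', d = d' + 1 := ⟨d - 1, by omega⟩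
    have hlen : (restrictM M r cols).length = k + 1 := by rw [restrictM_length]; omega
    have hhead : ((restrictM M r cols).headD []).length = cols.length := by
      rw [headD_eq_getD_zero, restrictM_getD M r cols 0 (by omega)]
      simp
    rw [alg_dop_go, hlen, if_neg (by omega), if_neg (by omega),
      alg_dop_expand, if_neg (by omega), hhead]
    apply PySem.List.foldl_congr_mem'
    intro i hi s'
    simp only [List.mem_range] at hi
    have hdrop : (restrictM M r cols).drop 1 = restrictM M (r + 1) cols := by
      rw [restrictM, restrictM, ← List.map_drop, List.drop_drop, Nat.add_comm]
    have hcne : restrictM M (r + 1) cols ≠ [] := by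
      intro hcon
      have := congrArg List.length hcon
      rw [restrictM_length] at this
      simp at this
      omega
    have hmineur : pyZipStar ((pyZipStar ((restrictM M r cols).drop 1)).eraseIdx i)
        = restrictM M (r + 1) (cols.eraseIdx i) := by
      rw [hdrop, minor_eq_eraseIdx (restrictM M (r + 1) cols) cols.length i hcne
        (by intro x hx
            simp only [restrictM, List.mem_map] at hx
            obtain ⟨row, _, rfl⟩ := hx
            simp)
        hi (by omega)]
      rw [restrictM, restrictM, List.map_map]
      apply List.map_congr_left
      intro row _
      simp only [Function.comp]
      rw [List.eraseIdx_map]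
    have hklen : k ≤ (cols.eraseIdx i).length := by
      rw [List.length_eraseIdx]
      simp only [hi, if_pos]
      omega
    have hpow : ((-1 : Int)) ^ (i + 2) = (-1) ^ i := by
      rw [pow_add]
      norm_num
    dsimp only
    rw [hmineur, pyCell_restrictM M r cols 0 i (by omega) hi, Nat.add_zero, hpow,
        ih (r + 1) (cols.eraseIdx i) s' _ f' d' (by omega) (by omega) (by omega) hklen,
        List.eraseIdx_eq_take_drop_succ]
    simp

theorem restrictM_full (M : List (List Int)) (q : Nat)
    (hw : ∀ row ∈ M, row.length = q) :
    restrictM M 0 (List.range q) = M := by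
  rw [restrictM, List.drop_zero]
  conv_rhs => rw [← List.map_id M]
  apply List.map_congr_left
  intro row hrow
  rw [show q = row.length from (hw row hrow).symm, map_getD_range, id]

-- ===== VERDICT (by name: the statement is the Claim_ definition above) =====
theorem alg_dop_spec : Claim_equal_alg_dop := by
  intro matrix somme prod _ hpre
  have hlen1 : 1 ≤ matrix.length := by
    rcases hpre with ⟨h, _⟩ | ⟨h, _⟩ | ⟨h, _⟩ <;> omega
  obtain ⟨f', hf⟩ : ∃ f', matrix.length = f' + 1 := ⟨matrix.length - 1, by omega⟩
  unfold Spec_alg_dop alg_dop alg_dop_alt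
  rcases hpre with ⟨h1, hq⟩ | ⟨h2, hq0, hq1⟩ | ⟨h3, hrest⟩
  · -- one row
    rw [hf, alg_dop_go, if_pos h1, if_pos (show f' + 1 = 1 by omega)]
  · -- two rows
    rw [hf, alg_dop_go, if_neg (by omega), if_pos h2,
      if_neg (show ¬ (f' + 1 = 1) by omega),
      alg_dop_expand, if_pos (show 0 + 2 = f' + 1 by omega)]
    have e0 : (List.range (matrix.headD []).length).getD 0 0 = 0 := by
      rw [List.getD, List.getElem?_eq_getElem (by rw [List.length_range]; omega)]
      simp
    have e1 : (List.range (matrix.headD []).length).getD 1 0 = 1 := by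
      rw [List.getD, List.getElem?_eq_getElem (by rw [List.length_range]; omega)]
      simp
    rw [e0, e1, det2]
  · rcases hrest with hq0 | ⟨hrect, hwide⟩
    · -- ≥3 rows, empty first row: both sides return somme unchanged
      rw [hf, alg_dop_go, if_neg (by omega), if_neg (by omega),
        if_neg (show ¬ (f' + 1 = 1) by omega),
        alg_dop_expand, if_neg (show ¬ (0 + 2 = f' + 1) by omega), hq0]
      simp
    · -- ≥3 rows, rectangular and at least as wide as tall
      have h := main_equiv matrix matrix.length (by omega) 0
        (List.range (matrix.headD []).length) (somme.getD []) prod matrix.length matrix.length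
        (by omega) le_rfl le_rfl (by simpa using hwide)
      rw [restrictM_full matrix (matrix.headD []).length hrect] at h
      rw [if_neg (by omega)]
      exact h
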